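-- pv_equiv track=rewrite | github.com/Guillermo-Gil-Garro/GITSTER | pipeline/cards/render_card_preview.py | parse_owners
-- ===== SOURCE A (Python) =====
-- from typing import List, Tuple
--
-- def safe_str(x) -> str:
--     return str(x if x is not None else "").strip()
--
-- def parse_owners(row: dict) -> List[str]:
--     """
--     Intenta sacar owners desde columnas típicas.
--     Devuelve lista única y ordenada alfabéticamente (case-insensitive).
--     """
--     candidates = [
--         row.get("owners_display"),
--         row.get("owners"),
--         row.get("playlist_owners"),
--         row.get("playlist_owner"),
--         row.get("owner"),
--         row.get("owners_canon"),
--     ]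
--     raw = ""
--     for c in candidates:
--         raw = safe_str(c)
--         if raw:
--             break
--     if not raw:
--         return []
--     for sep in ["|", ";", "·", "•", "/", "\\"]:
--         raw = raw.replace(sep, ",")
--     parts = [p.strip() for p in raw.split(",") if p.strip()]
--
--     seen = set()
--     out = []
--     for p in parts:
--         k = p.casefold()
--         if k not in seen:
--             seen.add(k)
--             out.append(p)
--     out.sort(key=lambda s: s.casefold())
--     return out
-- ===== SOURCE B (Python) =====
-- from typing import List
--
-- def safe_str(x) -> str:
--     return str(x if x is not None else "").strip()
--
-- _KEYS = ("owners_display", "owners", "playlist_owners",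
--          "playlist_owner", "owner", "owners_canon")
-- _SEPS = set("|;\u00b7\u2022/\\,")
--
-- def parse_owners(row: dict) -> List[str]:
--     # Single char-level tokenizer over the separator set (no replace/split
--     # staging), then stable sort by casefold and one adjacent-unique pass
--     # (no seen-set).
--     raw = next((v for v in (safe_str(row.get(k)) for k in _KEYS) if v), "")
--     parts = []
--     cur = []
--     for ch in raw + ",":
--         if ch in _SEPS:
--             t = "".join(cur).strip()
--             if t:
--                 parts.append(t)
--             cur = []
--         else:
--             cur.append(ch)
--     parts.sort(key=str.casefold)
--     out = []
--     prev = None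
--     for p in parts:
--         k = p.casefold()
--         if k != prev:
--             out.append(p)
--             prev = k
--     return out
-- ===== Notes on version B (the rewrite author's own statement) =====
-- stated objective: alternative
-- what changed: Replaces the six-pass replace-then-split tokenization by a single char-level scan over the separator set, the break-on-first-truthy candidate loop by a find-first over the key list, and the seen-set dedup followed by a sort by a stable sort by casefold followed by one adjacent-unique pass keeping the first element of each equal-casefold run.
import Mathlib
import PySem

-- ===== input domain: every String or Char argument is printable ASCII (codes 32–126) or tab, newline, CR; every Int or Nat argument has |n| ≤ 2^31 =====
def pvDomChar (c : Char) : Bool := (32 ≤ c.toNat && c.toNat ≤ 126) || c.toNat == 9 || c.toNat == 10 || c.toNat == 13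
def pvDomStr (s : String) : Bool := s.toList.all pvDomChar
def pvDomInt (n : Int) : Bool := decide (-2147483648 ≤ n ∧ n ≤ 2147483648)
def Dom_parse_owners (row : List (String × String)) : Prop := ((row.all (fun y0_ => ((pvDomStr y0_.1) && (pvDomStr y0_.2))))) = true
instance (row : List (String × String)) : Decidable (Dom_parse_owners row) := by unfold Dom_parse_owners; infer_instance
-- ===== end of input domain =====

-- B replaces A's replace-then-split staging by a single char-level tokenizer over the
-- separator set, and A's seen-set dedup + sort by a stable sort by casefold followed by
-- one adjacent-unique pass with a 'previous key' accumulator ('alternative' objective).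

-- str.casefold, exact on the ASCII domain (Dom), where casefold = lower
def pvCasefold (s : String) : String := PySem.Str.lower s

-- ===== PORT A =====
-- safe_str(x) = str(x if x is not None else "").strip()
def pvSafeStrA (x : Option String) : String := PySem.Str.strip (x.getD "")

-- 'raw = ""; for c in candidates: raw = safe_str(c); if raw: break'
def pvFirstRawA : List (Option String) → String
  | [] => ""
  | c :: rest => let raw := pvSafeStrA c; if raw ≠ "" then raw else pvFirstRawA rest

def parse_owners (row : List (String × String)) : List String :=
  let candidates := [PySem.Dict.get? (PySem.Dict.mk row) "owners_display", PySem.Dict.get? (PySem.Dict.mk row) "owners",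
    PySem.Dict.get? (PySem.Dict.mk row) "playlist_owners", PySem.Dict.get? (PySem.Dict.mk row) "playlist_owner",
    PySem.Dict.get? (PySem.Dict.mk row) "owner", PySem.Dict.get? (PySem.Dict.mk row) "owners_canon"]
  let raw := pvFirstRawA candidates
  if raw = "" then []
  else
    let raw := ["|", ";", "·", "•", "/", "\\"].foldl (fun r sep => PySem.Str.replace r sep ",") raw
    let parts := (((PySem.Str.split? raw ",").getD []).filter  -- sep "," ≠ "": split? is some here
      (fun p => PySem.Str.strip p != "")).map PySem.Str.strip
    let st := parts.foldl (fun (acc : PySem.Set String × List String) p =>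
      let k := pvCasefold p
      if PySem.Set.contains acc.1 k then acc
      else (PySem.Set.add acc.1 k, acc.2 ++ [p])) (PySem.Set.empty, [])
    PySem.List.sorted st.2 pvCasefold false

-- ===== PORT B =====
def pvKeysB : List String :=
  ["owners_display", "owners", "playlist_owners", "playlist_owner", "owner", "owners_canon"]

-- ch in _SEPS
def pvIsSep (c : Char) : Bool := ['|', ';', '·', '•', '/', '\\', ','].contains c

def parse_owners_alt (row : List (String × String)) : List String :=
  -- raw = next((v for v in (safe_str(row.get(k)) for k in _KEYS) if v), "")
  let raw := ((pvKeysB.map (fun k => PySem.Str.strip ((PySem.Dict.get? (PySem.Dict.mk row) k).getD ""))).find?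
    (fun v => v != "")).getD ""
  -- the char loop over raw + "," with state (parts, cur)
  let scan := (raw.toList ++ [',']).foldl
    (fun (st : List String × List Char) ch =>
      if pvIsSep ch then
        let t := PySem.Chars.strip st.2   -- "".join(cur).strip()
        if t ≠ [] then (st.1 ++ [String.ofList t], ([] : List Char)) else (st.1, [])
      else (st.1, st.2 ++ [ch])) ([], [])
  let parts := PySem.List.sorted scan.1 pvCasefold false
  -- adjacent-unique pass with prev : Option key
  (parts.foldl (fun (st : List String × Option String) p =>
      let k := pvCasefold p
      if st.2 ≠ some k then (st.1 ++ [p], some k) else st) ([], none)).1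

-- ===== PRECONDITION & SPEC =====
def Spec_parse_owners (row : List (String × String)) (out : List String) : Prop := out = parse_owners_alt row
instance (row : List (String × String)) (out : List String) : Decidable (Spec_parse_owners row out) := by unfold Spec_parse_owners; infer_instance

-- ===== CLAIM (what is proved, stated in full; the proofs are below) =====
def Claim_equal_parse_owners : Prop := ∀ (row : List (String × String)), Dom_parse_owners row → Spec_parse_owners row (parse_owners row)

-- ===== LEMMAS AND PROOFS =====

-- ---------- the candidate scan ----------
theorem pvFirst_eq_find (cs : List (Option String)) :
    pvFirstRawA cs =
      ((cs.map (fun x => PySem.Str.strip (x.getD ""))).find? (fun v => v != "")).getD "" := by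
  induction cs with
  | nil => rfl
  | cons c rest ih =>
    by_cases h : PySem.Str.strip (c.getD "") = ""
    · simp only [pvFirstRawA, pvSafeStrA, List.map_cons]
      rw [List.find?_cons_of_neg (by simp [h])]
      simp [h, ih]
    · simp only [pvFirstRawA, pvSafeStrA, List.map_cons]
      rw [List.find?_cons_of_pos (by simp [h])]
      simp [h]

-- ---------- splitting on a character set ----------
def pvSplitP (p : Char → Bool) : List Char → List (List Char)
  | [] => [[]]
  | c :: t => if p c then [] :: pvSplitP p t else (pvSplitP p t).modifyHead (c :: ·)

theorem pvReplaceGo_nil (a b : Char) (f : Nat) (acc : List Char) :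
    PySem.Chars.replace.go [a] [b] f [] acc = acc.reverse := by
  cases f
  · rw [PySem.Chars.replace.go.eq_def]; simp
  · rfl

theorem pvReplaceGo_cons (a b c : Char) (f : Nat) (t acc : List Char) :
    PySem.Chars.replace.go [a] [b] (f + 1) (c :: t) acc =
      (if [a].isPrefixOf (c :: t) = true then
        PySem.Chars.replace.go [a] [b] f (List.drop [a].length (c :: t)) ([b].reverse ++ acc)
       else PySem.Chars.replace.go [a] [b] f t (c :: acc)) := rfl

theorem pvSplitOnGo_nil (a : Char) (f : Nat) (cur : List Char) (acc : List (List Char)) :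
    PySem.Chars.splitOn.go [a] f [] cur acc = (cur.reverse :: acc).reverse := by
  cases f
  · rw [PySem.Chars.splitOn.go.eq_def]; simp
  · rfl

theorem pvSplitOnGo_cons (a c : Char) (f : Nat) (t cur : List Char) (acc : List (List Char)) :
    PySem.Chars.splitOn.go [a] (f + 1) (c :: t) cur acc =
      (if [a].isPrefixOf (c :: t) = true then
        PySem.Chars.splitOn.go [a] f (List.drop [a].length (c :: t)) [] (cur.reverse :: acc)
       else PySem.Chars.splitOn.go [a] f t (c :: cur) acc) := rfl

-- single-char replace is a map
theorem pvReplace_go (a b : Char) (fuel : Nat) :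
    ∀ (l acc : List Char), l.length ≤ fuel →
      PySem.Chars.replace.go [a] [b] fuel l acc =
        acc.reverse ++ l.map (fun c => if c == a then b else c) := by
  induction fuel with
  | zero =>
    intro l acc h
    rw [List.length_eq_zero_iff.1 (Nat.le_zero.1 h), pvReplaceGo_nil]
    simp
  | succ f ih =>
    intro l acc h
    cases l with
    | nil => rw [pvReplaceGo_nil]; simp
    | cons c t =>
      rw [pvReplaceGo_cons]
      rw [show ([a].isPrefixOf (c :: t)) = (a == c) from by simp [List.isPrefixOf]]
      simp only [List.length_cons] at h
      by_cases hc : a = c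
      · rw [if_pos (by simp [hc])]
        rw [show List.drop [a].length (c :: t) = t from by simp]
        rw [ih t _ (by omega)]
        simp [hc.symm]
      · rw [if_neg (by simp; exact hc)]
        rw [ih t _ (by omega)]
        simp only [List.map_cons, List.reverse_cons, List.append_assoc, List.singleton_append]
        rw [if_neg (by simp; exact fun e => hc e.symm)]

theorem pvReplace_single (a b : Char) (s : List Char) :
    PySem.Chars.replace s [a] [b] = s.map (fun c => if c == a then b else c) := by
  rw [PySem.Chars.replace]
  rw [if_neg (by simp)]
  rw [pvReplace_go a b s.length s [] le_rfl]
  simp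

theorem pvModifyHead_id (l : List (List Char)) : List.modifyHead (fun x => x) l = l := by
  cases l <;> rfl

-- single-char splitOn is pvSplitP
theorem pvSplitOn_go (a : Char) (fuel : Nat) :
    ∀ (l cur : List Char) (acc : List (List Char)), l.length ≤ fuel →
      PySem.Chars.splitOn.go [a] fuel l cur acc =
        acc.reverse ++ (pvSplitP (· == a) l).modifyHead (cur.reverse ++ ·) := by
  induction fuel with
  | zero =>
    intro l cur acc h
    rw [List.length_eq_zero_iff.1 (Nat.le_zero.1 h), pvSplitOnGo_nil]
    simp [pvSplitP]
  | succ f ih =>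
    intro l cur acc h
    cases l with
    | nil => rw [pvSplitOnGo_nil]; simp [pvSplitP]
    | cons c t =>
      rw [pvSplitOnGo_cons]
      rw [show ([a].isPrefixOf (c :: t)) = (a == c) from by simp [List.isPrefixOf]]
      simp only [List.length_cons] at h
      by_cases hc : a = c
      · rw [if_pos (by simp [hc])]
        rw [show List.drop [a].length (c :: t) = t from by simp]
        rw [ih t [] _ (by omega)]
        simp [pvSplitP, show (c == a) = true from by simp [hc.symm], pvModifyHead_id]
      · rw [if_neg (by simp; exact hc)]
        rw [ih t (c :: cur) acc (by omega)]
        simp only [pvSplitP, show (c == a) = false from by simp; exact fun e => hc e.symm,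
          Bool.false_eq_true, if_false, List.modifyHead_modifyHead]
        rw [show ((fun x => cur.reverse ++ x) ∘ (fun x => c :: x)) =
          (fun x => (c :: cur).reverse ++ x) from by funext x; simp]

theorem pvSplitOn_single (a : Char) (s : List Char) :
    PySem.Chars.splitOn s [a] = pvSplitP (· == a) s := by
  rw [PySem.Chars.splitOn, pvSplitOn_go a (s.length + 1) s [] [] (by omega)]
  simp [pvModifyHead_id]

-- pvSplitP through a map that fixes every non-separator
theorem pvSplitP_map (p q : Char → Bool) (f : Char → Char)
    (h1 : ∀ c, p (f c) = q c) (h2 : ∀ c, q c = false → f c = c) (l : List Char) :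
    pvSplitP p (l.map f) = pvSplitP q l := by
  induction l with
  | nil => rfl
  | cons c t ih =>
    simp only [List.map_cons, pvSplitP, h1]
    by_cases hq : q c = true
    · simp [hq, ih]
    · rw [Bool.not_eq_true] at hq
      simp [hq, ih, h2 c hq]

-- the six replaces collapse every separator to ','
def pvCollapse (c : Char) : Char :=
  if c = '|' ∨ c = ';' ∨ c = '·' ∨ c = '•' ∨ c = '/' ∨ c = '\\' then ',' else c

theorem pvRawCollapse (raw : String) :
    (["|", ";", "·", "•", "/", "\\"].foldl (fun r sep => PySem.Str.replace r sep ",") raw).toList =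
      raw.toList.map pvCollapse := by
  simp only [List.foldl_cons, List.foldl_nil, PySem.Str.toList_replace,
    show ("|" : String).toList = ['|'] from rfl, show (";" : String).toList = [';'] from rfl,
    show ("·" : String).toList = ['·'] from rfl, show ("•" : String).toList = ['•'] from rfl,
    show ("/" : String).toList = ['/'] from rfl, show ("\\" : String).toList = ['\\'] from rfl,
    show ("," : String).toList = [','] from rfl, pvReplace_single, List.map_map]
  apply List.map_congr_left
  intro c _
  simp only [Function.comp, pvCollapse]
  split_ifs <;> simp_all

-- tokens of a piece list: strip, drop empties
def pvTok (piece : List Char) : Option String :=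
  let t := PySem.Chars.strip piece
  if t = [] then none else some (String.ofList t)

-- A's '[p.strip() for p in … if p.strip()]' over string pieces is filterMap pvTok
theorem pvAparts (P : List (List Char)) :
    (((P.map String.ofList).filter (fun p => PySem.Str.strip p != "")).map PySem.Str.strip) =
      P.filterMap pvTok := by
  induction P with
  | nil => rfl
  | cons piece t ih =>
    have hs : PySem.Str.strip (String.ofList piece) = String.ofList (PySem.Chars.strip piece) := by
      apply String.toList_injective
      simp [PySem.Str.toList_strip]
    by_cases h : PySem.Chars.strip piece = []
    · have hn : pvTok piece = none := by simp [pvTok, h]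
      simp [hs, h, hn, ih]
    · have hsome : pvTok piece = some (String.ofList (PySem.Chars.strip piece)) := by
        simp [pvTok, h]
      simp [hs, h, hsome, ih]

-- B's scan loop: fold = parts ++ tokens of the remaining characters
def pvToks : List Char → List Char → List String
  | _, [] => []
  | cur, c :: t =>
    if pvIsSep c then (pvTok cur).toList ++ pvToks [] t else pvToks (cur ++ [c]) t

theorem pvScanFold (l : List Char) (parts : List String) (cur : List Char) :
    (l.foldl (fun (st : List String × List Char) ch =>
      if pvIsSep ch then
        let t := PySem.Chars.strip st.2
        if t ≠ [] then (st.1 ++ [String.ofList t], ([] : List Char)) else (st.1, [])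
      else (st.1, st.2 ++ [ch])) (parts, cur)).1 = parts ++ pvToks cur l := by
  induction l generalizing parts cur with
  | nil => simp [pvToks]
  | cons c t ih =>
    simp only [ne_eq, ite_not] at ih ⊢
    simp only [List.foldl_cons]
    by_cases hc : pvIsSep c
    · by_cases h : PySem.Chars.strip cur = []
      · simp [hc, h, ih, pvToks, pvTok]
      · simp [hc, h, ih, pvToks, pvTok]
    · simp [hc, ih, pvToks]

theorem pvToks_append_comma (s : List Char) :
    ∀ cur, pvToks cur (s ++ [',']) =
      ((pvSplitP pvIsSep s).modifyHead (cur ++ ·)).filterMap pvTok := by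
  induction s with
  | nil =>
    intro cur
    simp only [List.nil_append, pvToks, show pvIsSep ',' = true from rfl, if_true, pvSplitP,
      List.modifyHead, List.filterMap_cons, List.filterMap_nil, List.append_nil]
    cases pvTok cur <;> simp
  | cons c t ih =>
    intro cur
    by_cases hc : pvIsSep c
    · simp only [List.cons_append, pvToks, hc, if_true, ih [], pvSplitP,
        List.modifyHead, List.filterMap_cons, List.append_nil]
      cases pvTok cur <;> cases pvSplitP pvIsSep t <;> simp
    · simp only [List.cons_append, pvToks, hc, Bool.false_eq_true, if_false, ih (cur ++ [c]),
        pvSplitP, List.modifyHead_modifyHead]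
      congr 2
      funext x
      simp

-- bridge: A's string-level split on "," of the collapsed raw = pvSplitP pvIsSep, as strings
theorem pvSplitStr (s : String) :
    (PySem.Str.split? s ",").getD [] = (PySem.Chars.splitOn s.toList [',']).map String.ofList := by
  have h := PySem.Str.split?_map s ","
  rw [show PySem.Chars.split? s.toList (",".toList) =
        some (PySem.Chars.splitOn s.toList [',']) from by
      rw [PySem.Chars.split?]; simp [show ("," : String).toList = [','] from rfl]] at h
  cases hs : PySem.Str.split? s "," with
  | none => rw [hs] at h; simp at h
  | some P =>
    rw [hs] at h
    simp only [Option.map_some, Option.some.injEq] at h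
    rw [Option.getD_some, ← h, List.map_map]
    exact ((List.map_congr_left (fun p _ => by
      show (String.ofList ∘ String.toList) p = id p
      simp)).trans (List.map_id _)).symm

-- ---------- A's dedup loop vs sort + adjacent-unique ----------
def pvFkd (seen : List String) : List String → List String
  | [] => []
  | p :: rest =>
    if pvCasefold p ∈ seen then pvFkd seen rest
    else p :: pvFkd (pvCasefold p :: seen) rest

theorem pvFkd_congr (s s' : List String) (l : List String)
    (h : ∀ x, x ∈ s ↔ x ∈ s') : pvFkd s l = pvFkd s' l := by
  induction l generalizing s s' with
  | nil => rfl
  | cons p rest ih =>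
    simp only [pvFkd]
    by_cases hp : pvCasefold p ∈ s
    · rw [if_pos hp, if_pos ((h _).1 hp), ih s s' h]
    · rw [if_neg hp, if_neg (fun hh => hp ((h _).2 hh))]
      exact congrArg (p :: ·) (ih _ _ (by intro x; simp [List.mem_cons, h x]))

theorem pvAFold_eq_fkd (l : List String) (s : PySem.Set String) (o : List String) :
    (l.foldl (fun (acc : PySem.Set String × List String) p =>
      let k := pvCasefold p
      if PySem.Set.contains acc.1 k then acc
      else (PySem.Set.add acc.1 k, acc.2 ++ [p])) (s, o)).2 = o ++ pvFkd s l := by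
  induction l generalizing s o with
  | nil => simp [pvFkd]
  | cons p rest ih =>
    simp only [List.foldl_cons, pvFkd]
    by_cases h : pvCasefold p ∈ s
    · rw [if_pos ((PySem.Set.contains_iff s _).2 h), if_pos h, ih]
    · have hc : PySem.Set.contains s (pvCasefold p) = false := by
        by_contra hh
        exact h ((PySem.Set.contains_iff s _).1 (by revert hh; cases PySem.Set.contains s (pvCasefold p) <;> simp))
      rw [if_neg (by simpa using h), if_neg h, ih]
      rw [show PySem.Set.add s (pvCasefold p) = s ++ [pvCasefold p] from by simp [PySem.Set.add]; exact h]
      rw [pvFkd_congr (s ++ [pvCasefold p]) (pvCasefold p :: s) rest (by intro x; simp [or_comm])]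
      simp

-- filter of pvFkd: the head of each not-yet-seen casefold class, nothing else
theorem pvFkd_filter (s l : List String) (c : String) :
    (pvFkd s l).filter (fun y => pvCasefold y == c) =
      if c ∈ s then [] else ((l.filter (fun y => pvCasefold y == c)).head?.toList) := by
  induction l generalizing s with
  | nil => simp [pvFkd]
  | cons p rest ih =>
    simp only [pvFkd]
    by_cases hp : pvCasefold p ∈ s
    · rw [if_pos hp, ih]
      by_cases hc : c ∈ s
      · simp [hc]
      · have hne : pvCasefold p ≠ c := fun e => hc (e ▸ hp)
        simp [hc, hne]
    · rw [if_neg hp]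
      by_cases hkc : pvCasefold p = c
      · have hcns : c ∉ s := fun h' => hp (hkc ▸ h')
        simp [hkc, ih, hcns]
      · have hcs : (c ∈ pvCasefold p :: s) ↔ c ∈ s := by
          simp only [List.mem_cons]
          exact ⟨fun h' => h'.resolve_left (fun e => hkc e.symm), Or.inr⟩
        simp [hkc, ih, hcs]

-- stability of PySem's sort: filtering one casefold class commutes with sorting
theorem pvFilter_insertBy (x : String) (l : List String) (c : String)
    (hl : l.Pairwise (fun a b => pvCasefold a ≤ pvCasefold b)) :
    (PySem.List.insertBy (fun a b => decide (pvCasefold a < pvCasefold b)) x l).filter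
        (fun y => pvCasefold y == c) =
      if pvCasefold x == c then l.filter (fun y => pvCasefold y == c) ++ [x]
      else l.filter (fun y => pvCasefold y == c) := by
  induction l with
  | nil => simp [PySem.List.insertBy, List.filter_cons]
  | cons y ys ih =>
    rw [List.pairwise_cons] at hl
    simp only [PySem.List.insertBy]
    by_cases hlt : pvCasefold x < pvCasefold y
    · rw [if_pos (by exact decide_eq_true hlt)]
      by_cases hkc : pvCasefold x = c
      · have hnil : (y :: ys).filter (fun z => pvCasefold z == c) = [] := by
          rw [List.filter_eq_nil_iff]
          intro z hz
          have hyz : pvCasefold y ≤ pvCasefold z := by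
            rcases List.mem_cons.1 hz with rfl | hz'
            · exact le_refl _
            · exact hl.1 z hz'
          have : pvCasefold x < pvCasefold z := lt_of_lt_of_le hlt hyz
          simp only [beq_iff_eq]
          exact fun e => absurd (hkc ▸ e) (ne_of_gt this)
        simp [hkc, hnil]
      · simp [List.filter_cons, hkc]
    · rw [if_neg (by simp [hlt])]
      rw [List.filter_cons, List.filter_cons, ih hl.2]
      by_cases hkc : pvCasefold x = c <;> by_cases hyc : pvCasefold y = c <;>
        simp [hkc, hyc]

theorem pvSorted_filter (xs : List String) (c : String) :
    (PySem.List.sorted xs pvCasefold false).filter (fun y => pvCasefold y == c) =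
      xs.filter (fun y => pvCasefold y == c) := by
  induction xs using List.reverseRecOn with
  | nil => simp [PySem.List.sorted]
  | append_singleton xs x ih =>
    rw [PySem.List.sorted_eq_foldl_insertBy, List.foldl_append, List.foldl_cons, List.foldl_nil,
      ← PySem.List.sorted_eq_foldl_insertBy,
      pvFilter_insertBy x _ c (PySem.List.sorted_pairwise xs pvCasefold),
      List.filter_append, List.filter_cons, ih]
    by_cases hkc : pvCasefold x = c <;> simp [hkc]

-- adjacent-unique via the run-dropping recursion
def pvBuniq : List String → List String
  | [] => []
  | p :: rest => p :: pvBuniq (rest.dropWhile (fun q => pvCasefold q == pvCasefold p))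
  termination_by l => l.length
  decreasing_by exact Nat.lt_succ_of_le (List.length_dropWhile_le _ _)

theorem pvBuniq_mem {y : String} {l : List String} (h : y ∈ pvBuniq l) : y ∈ l := by
  induction l using pvBuniq.induct with
  | case1 => simp [pvBuniq] at h
  | case2 p rest ih =>
    rw [pvBuniq] at h
    rcases List.mem_cons.1 h with h | h
    · exact h ▸ List.mem_cons_self
    · exact List.mem_cons_of_mem _ ((List.dropWhile_sublist _).subset (ih h))

-- on a key-sorted list whose elements all have key ≥ c, dropping the leading
-- run of key c leaves only keys > c
theorem pvDropWhile_gt (l : List String) (c : String)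
    (hl : l.Pairwise (fun a b => pvCasefold a ≤ pvCasefold b))
    (hge : ∀ y ∈ l, c ≤ pvCasefold y) :
    ∀ y ∈ l.dropWhile (fun q => pvCasefold q == c), c < pvCasefold y := by
  induction l with
  | nil => simp
  | cons q t ih =>
    rw [List.pairwise_cons] at hl
    by_cases hq : pvCasefold q = c
    · rw [List.dropWhile_cons_of_pos (by simp [hq])]
      exact ih hl.2 (fun y hy => hq ▸ hl.1 y hy)
    · rw [List.dropWhile_cons_of_neg (by simp [hq])]
      intro y hy
      have hcq : c < pvCasefold q :=
        lt_of_le_of_ne (hge q List.mem_cons_self) (fun e => hq e.symm)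
      rcases List.mem_cons.1 hy with rfl | hy
      · exact hcq
      · exact lt_of_lt_of_le hcq (hl.1 y hy)

theorem pvBuniq_pairwise (l : List String)
    (hl : l.Pairwise (fun a b => pvCasefold a ≤ pvCasefold b)) :
    (pvBuniq l).Pairwise (fun a b => pvCasefold a < pvCasefold b) := by
  induction l using pvBuniq.induct with
  | case1 => simp [pvBuniq]
  | case2 p rest ih =>
    rw [List.pairwise_cons] at hl
    rw [pvBuniq, List.pairwise_cons]
    refine ⟨fun y hy => ?_, ih (hl.2.sublist (List.dropWhile_sublist _))⟩
    exact pvDropWhile_gt rest (pvCasefold p) hl.2 hl.1 y (pvBuniq_mem hy)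

theorem pvBuniq_filter (l : List String) (c : String)
    (hl : l.Pairwise (fun a b => pvCasefold a ≤ pvCasefold b)) :
    (pvBuniq l).filter (fun y => pvCasefold y == c) =
      (l.filter (fun y => pvCasefold y == c)).head?.toList := by
  induction l using pvBuniq.induct with
  | case1 => simp [pvBuniq]
  | case2 p rest ih =>
    rw [List.pairwise_cons] at hl
    have ih' := ih (hl.2.sublist (List.dropWhile_sublist _))
    rw [pvBuniq, List.filter_cons, List.filter_cons]
    by_cases hkc : pvCasefold p = c
    · have hnil : ((rest.dropWhile (fun q => pvCasefold q == pvCasefold p)).filter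
          (fun y => pvCasefold y == c)) = [] := by
        rw [List.filter_eq_nil_iff]
        intro z hz
        have := pvDropWhile_gt rest (pvCasefold p) hl.2 hl.1 z hz
        simp only [beq_iff_eq]
        exact fun e => absurd (hkc ▸ e) (ne_of_gt this)
      rw [ih', hnil]
      simp [hkc]
    · have hdrop : rest.filter (fun y => pvCasefold y == c) =
          ((rest.dropWhile (fun q => pvCasefold q == pvCasefold p)).filter
            (fun y => pvCasefold y == c)) := by
        conv_lhs => rw [← List.takeWhile_append_dropWhile
          (p := fun q => pvCasefold q == pvCasefold p) (l := rest)]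
        rw [List.filter_append]
        have htw : (rest.takeWhile (fun q => pvCasefold q == pvCasefold p)).filter
            (fun y => pvCasefold y == c) = [] := by
          rw [List.filter_eq_nil_iff]
          intro z hz
          have hzp := List.mem_takeWhile_imp hz
          simp only [beq_iff_eq] at hzp ⊢
          exact fun e => hkc (by rw [← hzp]; exact e)
        rw [htw, List.nil_append]
      rw [ih', ← hdrop]
      simp [hkc]

-- B's prev-key loop computes pvBuniq
theorem pvPrev_go (l : List String) :
    ∀ (out : List String) (c : String),
      (l.foldl (fun (st : List String × Option String) p =>
        let k := pvCasefold p
        if st.2 ≠ some k then (st.1 ++ [p], some k) else st) (out, some c)).1 =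
      out ++ pvBuniq (l.dropWhile (fun q => pvCasefold q == c)) := by
  induction l with
  | nil => intro out c; simp [pvBuniq]
  | cons p t ih =>
    intro out c
    simp only [List.foldl_cons]
    by_cases h : pvCasefold p = c
    · rw [if_neg (by simp [h]), List.dropWhile_cons_of_pos (by simp [h]), ih]
    · rw [if_pos (by simp; exact fun e => h e.symm),
        List.dropWhile_cons_of_neg (by simp [h]), ih, pvBuniq]
      simp

theorem pvPrev_eq_buniq (l : List String) :
    (l.foldl (fun (st : List String × Option String) p =>
      let k := pvCasefold p
      if st.2 ≠ some k then (st.1 ++ [p], some k) else st) ([], none)).1 = pvBuniq l := by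
  cases l with
  | nil => simp [pvBuniq]
  | cons p t =>
    simp only [List.foldl_cons, if_pos (by simp : (none : Option String) ≠ some (pvCasefold p)),
      pvPrev_go, pvBuniq]
    simp

-- A's dedup-then-sort equals sort-then-adjacent-unique, for any parts list
theorem pvMain (parts : List String) :
    PySem.List.sorted (parts.foldl (fun (acc : PySem.Set String × List String) p =>
      let k := pvCasefold p
      if PySem.Set.contains acc.1 k then acc
      else (PySem.Set.add acc.1 k, acc.2 ++ [p])) (PySem.Set.empty, [])).2 pvCasefold false =
    pvBuniq (PySem.List.sorted parts pvCasefold false) := by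
  rw [pvAFold_eq_fkd, List.nil_append,
    show (PySem.Set.empty : PySem.Set String) = [] from rfl]
  refine PySem.List.sorted_eq_of_perm_of_pairwise_lt _ _ pvCasefold ?_ ?_
  · refine List.perm_iff_count.2 (fun x => ?_)
    rw [← List.count_filter (p := fun y => pvCasefold y == pvCasefold x) (by simp),
        ← List.count_filter (p := fun y => pvCasefold y == pvCasefold x) (l := pvFkd [] parts) (by simp)]
    rw [pvBuniq_filter _ _ (PySem.List.sorted_pairwise parts pvCasefold), pvSorted_filter,
        pvFkd_filter]
    simp
  · exact pvBuniq_pairwise _ (PySem.List.sorted_pairwise parts pvCasefold)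

-- the two tokenizations agree: A's replace+split+strip-filter = B's char scan
theorem pvParts_eq (raw : String) :
    ((((PySem.Str.split? (["|", ";", "·", "•", "/", "\\"].foldl
          (fun r sep => PySem.Str.replace r sep ",") raw) ",").getD []).filter
        (fun p => PySem.Str.strip p != "")).map PySem.Str.strip) =
      pvToks [] (raw.toList ++ [',']) := by
  rw [pvSplitStr, pvAparts, pvToks_append_comma,
    show PySem.Chars.splitOn (["|", ";", "·", "•", "/", "\\"].foldl
        (fun r sep => PySem.Str.replace r sep ",") raw).toList [','] =
      pvSplitP pvIsSep raw.toList from by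
      rw [pvSplitOn_single, pvRawCollapse]
      refine pvSplitP_map _ _ _ ?_ ?_ _
      · intro c
        simp only [pvCollapse, pvIsSep]
        split_ifs with h
        · rcases h with h|h|h|h|h|h <;> subst h <;> rfl
        · push Not at h
          obtain ⟨n1, n2, n3, n4, n5, n6⟩ := h
          by_cases hc : c = ','
          · subst hc; rfl
          · simp [List.contains_eq_mem, n1, n2, n3, n4, n5, n6, hc]
      · intro c hc
        simp only [pvIsSep, List.contains_eq_mem, List.mem_cons] at hc
        simp only [pvCollapse]
        split_ifs with h
        · exfalso; rcases h with h|h|h|h|h|h <;> simp [h] at hc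
        · rfl]
  simp [pvModifyHead_id]

-- ===== VERDICT (by name: the statement is the Claim_ definition above) =====
set_option maxHeartbeats 1000000 in
theorem parse_owners_spec : Claim_equal_parse_owners := by
  intro row _
  unfold Spec_parse_owners parse_owners parse_owners_alt
  have hraw : pvFirstRawA [PySem.Dict.get? (PySem.Dict.mk row) "owners_display", PySem.Dict.get? (PySem.Dict.mk row) "owners",
      PySem.Dict.get? (PySem.Dict.mk row) "playlist_owners", PySem.Dict.get? (PySem.Dict.mk row) "playlist_owner",
      PySem.Dict.get? (PySem.Dict.mk row) "owner", PySem.Dict.get? (PySem.Dict.mk row) "owners_canon"] =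
      ((pvKeysB.map (fun k => PySem.Str.strip ((PySem.Dict.get? (PySem.Dict.mk row) k).getD ""))).find?
        (fun v => v != "")).getD "" := by
    rw [pvFirst_eq_find]; rfl
  rw [← hraw]
  set raw := pvFirstRawA [PySem.Dict.get? (PySem.Dict.mk row) "owners_display", PySem.Dict.get? (PySem.Dict.mk row) "owners",
      PySem.Dict.get? (PySem.Dict.mk row) "playlist_owners", PySem.Dict.get? (PySem.Dict.mk row) "playlist_owner",
      PySem.Dict.get? (PySem.Dict.mk row) "owner", PySem.Dict.get? (PySem.Dict.mk row) "owners_canon"] with hr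
  simp only [pvScanFold, List.nil_append, pvPrev_eq_buniq]
  by_cases h : raw = ""
  · rw [if_pos h, h]
    rw [show pvToks [] ((("" : String)).toList ++ [',']) = [] from rfl,
      show PySem.List.sorted ([] : List String) pvCasefold false = [] from rfl]
    simp [pvBuniq]
  · rw [if_neg h, ← pvParts_eq raw]
    exact pvMain _
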